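-- pv_equiv track=rewrite | github.com/RossiterXYZ/AoC2015 | Day11/Puzzle.py | IncrementPasswordString
-- ===== SOURCE A (Python) =====
-- def IncrementPasswordString(_Input):
--     Input = list(_Input)
--     for Index in reversed(range(len(Input))):
--         if Input[Index] == 'z':
--             Input[Index] = 'a'
--         else:
--             Input[Index] = chr(ord(Input[Index])+1)
--             break
--     return "".join(Input)
-- ===== SOURCE B (Python) =====
-- def IncrementPasswordString(_Input):
--     stripped = _Input.rstrip('z')
--     num_z = len(_Input) - len(stripped)
--     if not stripped:
--         return 'a' * len(_Input)
--     return stripped[:-1] + chr(ord(stripped[-1]) + 1) + 'a' * num_z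
-- ===== Notes on version B (the rewrite author's own statement) =====
-- stated objective: idiomatic
-- what changed: B replaces the right-to-left mutate-and-break loop over a char list by slicing: rstrip the trailing 'z' run, then concatenate the unchanged prefix, the incremented pivot character and the wrapped 'a's.
import Mathlib
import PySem

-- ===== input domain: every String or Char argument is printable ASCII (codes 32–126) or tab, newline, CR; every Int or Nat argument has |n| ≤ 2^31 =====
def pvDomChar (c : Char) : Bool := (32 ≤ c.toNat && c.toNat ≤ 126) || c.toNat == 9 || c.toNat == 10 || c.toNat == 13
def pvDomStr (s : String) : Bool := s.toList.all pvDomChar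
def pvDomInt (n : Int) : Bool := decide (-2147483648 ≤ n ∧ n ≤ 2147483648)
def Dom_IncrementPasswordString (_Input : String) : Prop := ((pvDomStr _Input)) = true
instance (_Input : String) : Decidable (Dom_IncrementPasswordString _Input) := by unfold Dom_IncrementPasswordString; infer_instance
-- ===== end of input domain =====

-- B replaces A's right-to-left mutate-and-break loop by slicing: rstrip the trailing
-- 'z' run, then concatenate unchanged prefix + incremented pivot + wrapped 'a's (idiomatic).

-- ===== PORT A =====
-- A's 'for Index in reversed(range(len(Input)))' loop with break, expressed as the
-- obvious recursion over the reversed character list: 'z' → 'a' and continue,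
-- otherwise increment that character and stop (the untouched rest is kept as is).
def pvLoopA : List Char → List Char
  | [] => []
  | c :: rest => if c = 'z' then 'a' :: pvLoopA rest else Char.ofNat (c.toNat + 1) :: rest

def IncrementPasswordString (_Input : String) : String :=
  String.ofList ((pvLoopA _Input.toList.reverse).reverse)

-- ===== PORT B =====
def IncrementPasswordString_alt (_Input : String) : String :=
  let chars := _Input.toList
  -- _Input.rstrip('z'), kept reversed: drop the trailing run of 'z' (exact port of rstrip('z'))
  let strippedR := chars.reverse.dropWhile (· = 'z')
  let num_z := chars.length - strippedR.length
  match strippedR with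
  | [] => String.ofList (List.replicate chars.length 'a')            -- 'a' * len(_Input)
  | c :: t =>                                                     -- stripped[:-1] + chr(ord(stripped[-1])+1) + 'a'*num_z
      String.ofList (t.reverse ++ [Char.ofNat (c.toNat + 1)] ++ List.replicate num_z 'a')

-- ===== PRECONDITION & SPEC =====
def Spec_IncrementPasswordString (_Input : String) (out : String) : Prop := out = IncrementPasswordString_alt _Input
instance (_Input : String) (out : String) : Decidable (Spec_IncrementPasswordString _Input out) := by unfold Spec_IncrementPasswordString; infer_instance

-- ===== CLAIM (what is proved, stated in full; the proofs are below) =====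
def Claim_equal_IncrementPasswordString : Prop := ∀ (_Input : String), Dom_IncrementPasswordString _Input → Spec_IncrementPasswordString _Input (IncrementPasswordString _Input)

-- ===== LEMMAS AND PROOFS =====

-- A's loop result, characterised: a run of 'a's for the dropped 'z's, then (if anything
-- remains) the incremented pivot followed by the untouched remainder.
theorem pvLoopA_eq (l : List Char) :
    pvLoopA l = List.replicate (l.length - (l.dropWhile (· = 'z')).length) 'a' ++
      (match l.dropWhile (· = 'z') with
       | [] => []
       | c :: t => Char.ofNat (c.toNat + 1) :: t) := by
  induction l with
  | nil => simp [pvLoopA]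
  | cons c rest ih =>
    by_cases hc : c = 'z'
    · have hle := List.length_dropWhile_le (p := (· = 'z')) (l := rest)
      have hlen : (c :: rest).length - ((c :: rest).dropWhile (· = 'z')).length
          = (rest.length - (rest.dropWhile (· = 'z')).length) + 1 := by
        simp [List.dropWhile, hc]; omega
      simp only [pvLoopA, if_pos hc, ih, hlen, List.replicate_succ]
      simp [List.dropWhile, hc]
    · simp [pvLoopA, hc, List.dropWhile]

theorem IncrementPasswordString_spec : Claim_equal_IncrementPasswordString := by
  intro s _
  unfold Spec_IncrementPasswordString IncrementPasswordString IncrementPasswordString_alt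
  simp only []
  rw [pvLoopA_eq]
  cases hd : s.toList.reverse.dropWhile (· = 'z') with
  | nil => simp
  | cons c t => simp [List.reverse_append]
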